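-- pv_equiv track=rewrite | github.com/atcherkasov/tree-Wilf-classes | source/poly_func/my_poly_functions.py | mult_global
-- ===== SOURCE A (Python) =====
-- def add_local(a: list, b: list) -> list:
--     if len(a) < len(b):
--         a, b = b, a
--     ans = a[::]
--     ind = len(ans) - 1
--     for i in range(len(b) - 1, -1, -1):
--         ans[ind] += b[i]
--         ind -= 1
--     i = 0
--     while i < len(ans) and ans[i] == 0:
--         i += 1
--     if i == len(ans):
--         return [0]
--     return ans[i:]
--
-- def mult_local(a: list, b: list, max_pow) -> list:
--     ans = [0] * min((len(a) + len(b) - 1), max_pow + 1)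
--     iterat_1 = min(len(a), max_pow + 1)
--     ans_len = len(ans)
--     a_len = len(a)
--     b_len = len(b)
--     for i in range(iterat_1):
--         # хотим вычислить коэффициент при y^((len(a) + len(b) - 1) - i)
--         iterat_2 = min(max_pow - i + 1, len(b))
--         for j in range(iterat_2):
--             ans[ans_len - i - j - 1] += a[a_len - i - 1] * b[b_len - j - 1]
--     i = 0
--     while i < ans_len and ans[i] == 0:
--         i += 1
--     if i == ans_len:
--         return [0]
--     return ans[i:]
--
-- def mult_global(a: list, b: list, x_size: int, y_pow: int) -> list:
--     """
--     вычисляет произведение двух мнгочленов от двух переменных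
--     :param a:
--     :param b:
--     :param size: размер по которому я 'обрезаю' многочлен.
--                  Нужно для того, чтобы все степени многочлена
--                  по х не превосходили заданного значение
--                  (оно как раз и задаётся через size)
--     :return:
--     """
--     ans = [[0]] * (len(a) + len(b) - 1)
--     for i in range(len(a)):
--         # хотим вычислить коэффициент при x^((len(a) + len(b) - 1) - i)
--         for j in range(len(b)):
--             if (len(a) + len(b) - 1) - x_size <= i + j:
--                 ans[i + j] = add_local(ans[i + j], mult_local(a[i], b[j], y_pow))
--     i = 0
--     while i < len(ans) and ans[i] == [0]:
--         i += 1
--     if i == len(ans):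
--         return [[0]]
--     ans = ans[i:]
--     return ans[-x_size:]
-- ===== SOURCE B (Python) =====
-- def mult_global(a, b, x_size, y_pow):
--     # B: per-diagonal closed-form computation: each kept x-row is rebuilt directly
--     # from its true y-coefficients (a double convolution sum), no accumulation
--     # arrays and no intermediate normalization.
--     la, lb = len(a), len(b)
--     n = la + lb - 1
--     mya = 0
--     for r in a:
--         mya = max(mya, len(r))
--     myb = 0
--     for r in b:
--         myb = max(myb, len(r))
--     bound = max(0, min(y_pow + 1, mya + myb - 1))
--
--     def coeff(s, d):
--         # coefficient of x^(n-1-s) * y^d in the full product; within the window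
--         # both big-endian indices are in range
--         tot = 0
--         for i in range(max(0, s - lb + 1), min(la, s + 1)):
--             ra, rb = a[i], b[s - i]
--             for p in range(max(0, d - len(rb) + 1), min(len(ra), d + 1)):
--                 tot += ra[len(ra) - 1 - p] * rb[len(rb) - 1 - (d - p)]
--         return tot
--
--     rows = []
--     for s in range(max(n - x_size, 0), n):
--         cs = [coeff(s, d) for d in range(bound)]
--         deg = -1
--         for d in range(bound):
--             if cs[d] != 0:
--                 deg = d
--         rows.append([cs[d] for d in range(deg, -1, -1)] if deg >= 0 else [0])
--
--     k = 0
--     while k < len(rows) and rows[k] == [0]: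
--         k += 1
--     return rows[k:] if k < len(rows) else [[0]]
-- ===== Notes on version B (the rewrite author's own statement) =====
-- stated objective: alternative
-- what changed: Instead of A's in-place accumulation into shared big-endian arrays (repeatedly adding truncated pairwise row products with add_local/mult_local and re-stripping after every addition), B computes each kept x-diagonal's y-coefficient list directly by a closed double convolution sum over the contributing row pairs, then normalizes each row once and strips the leading [0] rows.
import Mathlib
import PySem

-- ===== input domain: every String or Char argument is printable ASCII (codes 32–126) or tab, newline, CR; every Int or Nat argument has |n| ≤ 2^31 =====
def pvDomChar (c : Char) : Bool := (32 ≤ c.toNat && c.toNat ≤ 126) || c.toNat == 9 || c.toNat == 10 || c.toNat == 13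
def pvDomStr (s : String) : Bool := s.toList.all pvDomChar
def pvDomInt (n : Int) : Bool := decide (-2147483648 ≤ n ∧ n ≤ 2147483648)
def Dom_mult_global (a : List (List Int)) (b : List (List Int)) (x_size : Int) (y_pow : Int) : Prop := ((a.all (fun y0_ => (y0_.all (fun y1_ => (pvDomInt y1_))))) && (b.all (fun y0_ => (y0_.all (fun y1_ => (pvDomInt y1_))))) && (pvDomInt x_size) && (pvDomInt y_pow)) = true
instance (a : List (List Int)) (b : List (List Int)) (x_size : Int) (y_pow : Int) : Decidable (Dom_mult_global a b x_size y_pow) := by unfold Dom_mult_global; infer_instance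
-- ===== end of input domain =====

-- B replaces A's in-place accumulation into shared big-endian arrays by a direct
-- per-diagonal closed-form convolution sum (alternative decomposition, same values).

-- ===== PORT A =====
-- xs[i] read / 'xs[i] += v' for an index i that is provably in range at every use
-- site below (so getD/set with .toNat are exact there).
def pvGetZ (xs : List Int) (i : Int) : Int := xs.getD i.toNat 0
def pvGetRow (xs : List (List Int)) (i : Int) : List Int := xs.getD i.toNat []
def pvAddAt (xs : List Int) (i : Int) (v : Int) : List Int := xs.set i.toNat (xs.getD i.toNat 0 + v)

-- 'i = 0; while i < len(ans) and ans[i] == 0: i += 1'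
def pvLeadZeros : List Int → Nat
  | [] => 0
  | x :: xs => if x = 0 then pvLeadZeros xs + 1 else 0

-- the trailing normalization shared verbatim by add_local and mult_local:
-- 'if i == len(ans): return [0]; return ans[i:]'
def pvNormRow (ans : List Int) : List Int :=
  let i := pvLeadZeros ans
  if i = ans.length then [0] else ans.drop i

def add_local (a b : List Int) : List Int :=
  let p := if a.length < b.length then (b, a) else (a, b)
  let a' := p.1
  let b' := p.2
  -- ans = a[::]; ind = len(ans)-1; for i in range(len(b)-1,-1,-1): ans[ind] += b[i]; ind -= 1
  let st := (PySem.List.pyRange ((b'.length : Int) - 1) (-1) (-1)).foldl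
      (fun (st : List Int × Int) i => (pvAddAt st.1 st.2 (pvGetZ b' i), st.2 - 1))
      (a', (a'.length : Int) - 1)
  pvNormRow st.1

def mult_local (a b : List Int) (max_pow : Int) : List Int :=
  let ansLen : Int := min ((a.length : Int) + (b.length : Int) - 1) (max_pow + 1)
  let ans : List Int := List.replicate ansLen.toNat 0   -- [0] * n (n ≤ 0 gives [])
  let iterat1 : Int := min (a.length : Int) (max_pow + 1)
  let aLen : Int := a.length
  let bLen : Int := b.length
  let ans := (PySem.List.pyRange 0 iterat1 1).foldl (fun ans i =>
      let iterat2 : Int := min (max_pow - i + 1) bLen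
      (PySem.List.pyRange 0 iterat2 1).foldl (fun ans j =>
          pvAddAt ans (ansLen - i - j - 1)
            (pvGetZ a (aLen - i - 1) * pvGetZ b (bLen - j - 1))) ans) ans
  pvNormRow ans

-- 'i = 0; while i < len(ans) and ans[i] == [0]: i += 1'
def pvLeadRows : List (List Int) → Nat
  | [] => 0
  | r :: rs => if r = [0] then pvLeadRows rs + 1 else 0

def mult_global (a : List (List Int)) (b : List (List Int)) (x_size : Int) (y_pow : Int) : List (List Int) :=
  let la : Int := a.length
  let lb : Int := b.length
  let ans : List (List Int) := List.replicate (la + lb - 1).toNat [0]   -- [[0]] * n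
  let ans := (PySem.List.pyRange 0 la 1).foldl (fun ans i =>
      (PySem.List.pyRange 0 lb 1).foldl (fun ans j =>
          if la + lb - 1 - x_size ≤ i + j then
            ans.set (i + j).toNat
              (add_local (pvGetRow ans (i + j)) (mult_local (pvGetRow a i) (pvGetRow b j) y_pow))
          else ans) ans) ans
  let i := pvLeadRows ans
  if i = ans.length then [[0]]
  else
    let ans := ans.drop i
    PySem.List.slice ans (some (-x_size)) none   -- ans[-x_size:]

-- ===== PORT B =====
-- coeff(s, d): direct convolution sum over the contributing row pairs
-- (inside the window both big-endian indices are provably in range)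
def pvCoeff (a b : List (List Int)) (s d : Int) : Int :=
  let la : Int := a.length
  let lb : Int := b.length
  (PySem.List.pyRange (max 0 (s - lb + 1)) (min la (s + 1)) 1).foldl (fun tot i =>
      let ra := pvGetRow a i
      let rb := pvGetRow b (s - i)
      (PySem.List.pyRange (max 0 (d - (rb.length:Int) + 1)) (min (ra.length:Int) (d + 1)) 1).foldl
        (fun tot p => tot + pvGetZ ra ((ra.length:Int) - 1 - p)
          * pvGetZ rb ((rb.length:Int) - 1 - (d - p))) tot) 0

def mult_global_alt (a : List (List Int)) (b : List (List Int)) (x_size : Int) (y_pow : Int) : List (List Int) :=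
  let la : Int := a.length
  let lb : Int := b.length
  let n : Int := la + lb - 1
  let mya : Int := a.foldl (fun m r => max m (r.length : Int)) 0
  let myb : Int := b.foldl (fun m r => max m (r.length : Int)) 0
  let bound : Int := max 0 (min (y_pow + 1) (mya + myb - 1))
  let rows := (PySem.List.pyRange (max (n - x_size) 0) n 1).foldl (fun rows s =>
      let cs := (PySem.List.pyRange 0 bound 1).map (pvCoeff a b s)
      let deg := (PySem.List.pyRange 0 bound 1).foldl
          (fun deg d => if PySem.List.pyGetD cs d 0 ≠ 0 then d else deg) (-1)
      rows ++ [if 0 ≤ deg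
        then (PySem.List.pyRange deg (-1) (-1)).map (fun d => PySem.List.pyGetD cs d 0)
        else [0]]) []
  let k := pvLeadRows rows
  if k < rows.length then rows.drop k else [[0]]

-- ===== PRECONDITION & SPEC =====
def Spec_mult_global (a : List (List Int)) (b : List (List Int)) (x_size : Int) (y_pow : Int) (out : List (List Int)) : Prop := out = mult_global_alt a b x_size y_pow
instance (a : List (List Int)) (b : List (List Int)) (x_size : Int) (y_pow : Int) (out : List (List Int)) : Decidable (Spec_mult_global a b x_size y_pow out) := by unfold Spec_mult_global; infer_instance

-- ===== CLAIM (what is proved, stated in full; the proofs are below) =====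
def Claim_equal_mult_global : Prop := ∀ (a : List (List Int)) (b : List (List Int)) (x_size : Int) (y_pow : Int), Dom_mult_global a b x_size y_pow → Spec_mult_global a b x_size y_pow (mult_global a b x_size y_pow)

-- ===== LEMMAS AND PROOFS =====
-- Coefficient-function view of big-endian integer rows, and the normalization
-- (strip leading zeros / [0] sentinel) both programs share.

def pvToFun (r : List Int) (d : Nat) : Int := r.reverse.getD d 0

def pvDegB (f : Nat → Int) : Nat → Option Nat
  | 0 => none
  | n+1 => if f n ≠ 0 then some n else pvDegB f n

def pvNormF (f : Nat → Int) (n : Nat) : List Int :=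
  match pvDegB f n with
  | none => [0]
  | some D => ((List.range (D+1)).map f).reverse

lemma pvDegB_succ (f : Nat → Int) (n : Nat) :
    pvDegB f (n+1) = if f n ≠ 0 then some n else pvDegB f n := rfl


lemma pvNormF_eq_none (f : Nat → Int) (n : Nat) (h : pvDegB f n = none) :
    pvNormF f n = [0] := by unfold pvNormF; rw [h]

lemma pvNormF_eq_some (f : Nat → Int) (n D : Nat) (h : pvDegB f n = some D) :
    pvNormF f n = ((List.range (D+1)).map f).reverse := by unfold pvNormF; rw [h]

lemma pvToFun_eq (r : List Int) (d : Nat) :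
    pvToFun r d = if h : d < r.length then r[r.length - 1 - d] else 0 := by
  unfold pvToFun
  rcases Nat.lt_or_ge d r.length with h | h
  · rw [dif_pos h, List.getD_eq_getElem _ _ (by simpa using h)]
    rw [List.getElem_reverse]
  · rw [dif_neg (by omega), List.getD_eq_default _ _ (by simpa using h)]

lemma pvToFun_zero_of_ge (r : List Int) (d : Nat) (h : r.length ≤ d) : pvToFun r d = 0 := by
  rw [pvToFun_eq, dif_neg (by omega)]

lemma pvToFun_cons (x : Int) (xs : List Int) (d : Nat) :
    pvToFun (x :: xs) d =
      if d < xs.length then pvToFun xs d else if d = xs.length then x else 0 := by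
  unfold pvToFun
  rw [List.reverse_cons]
  rcases Nat.lt_or_ge d xs.length with h | h
  · rw [if_pos h, List.getD_append xs.reverse [x] 0 d (by simpa using h)]
  · rw [if_neg (by omega), List.getD_append_right xs.reverse [x] 0 d (by simpa using h)]
    by_cases hd : d = xs.length
    · subst hd
      simp
    · rw [if_neg hd, List.getD_eq_default _ _ (by simp; omega)]

lemma pvDegB_eq_none_iff (f : Nat → Int) (n : Nat) :
    pvDegB f n = none ↔ ∀ d, d < n → f d = 0 := by
  induction n with
  | zero => simp [pvDegB]
  | succ n ih =>
    rw [pvDegB_succ]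
    split_ifs with h
    · constructor
      · intro hc; cases hc
      · intro hall; exact absurd (hall n (by omega)) h
    · rw [not_not] at h
      rw [ih]
      constructor
      · intro hall d hd
        rcases Nat.lt_or_ge d n with hd' | hd'
        · exact hall d hd'
        · have : d = n := by omega
          subst this; exact h
      · intro hall d hd; exact hall d (by omega)

lemma pvDegB_eq_some (f : Nat → Int) (n D : Nat) (h : pvDegB f n = some D) :
    D < n ∧ f D ≠ 0 ∧ ∀ d, D < d → d < n → f d = 0 := by
  induction n with
  | zero => cases h
  | succ n ih =>
    rw [pvDegB_succ] at h
    split_ifs at h with hf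
    · cases h
      exact ⟨by omega, hf, by intro d h1 h2; omega⟩
    · rw [not_not] at hf
      obtain ⟨h1, h2, h3⟩ := ih h
      refine ⟨by omega, h2, ?_⟩
      intro d hd1 hd2
      rcases Nat.lt_or_ge d n with hd' | hd'
      · exact h3 d hd1 hd'
      · have : d = n := by omega
        subst this; exact hf

lemma pvDegB_congr (f g : Nat → Int) (n : Nat) (h : ∀ d, d < n → f d = g d) :
    pvDegB f n = pvDegB g n := by
  induction n with
  | zero => rfl
  | succ n ih =>
    rw [pvDegB_succ, pvDegB_succ, h n (by omega), ih (fun d hd => h d (by omega))]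

lemma pvDegB_ext (f : Nat → Int) (n m : Nat) (hnm : n ≤ m) (h : ∀ d, n ≤ d → f d = 0) :
    pvDegB f m = pvDegB f n := by
  induction m with
  | zero =>
    have : n = 0 := by omega
    subst this; rfl
  | succ m ih =>
    rcases Nat.eq_or_lt_of_le hnm with he | hlt
    · subst he; rfl
    · rw [pvDegB_succ, if_neg (by simp [h m (by omega)]), ih (by omega)]

lemma pvNormF_congr (f g : Nat → Int) (n : Nat) (h : ∀ d, d < n → f d = g d) :
    pvNormF f n = pvNormF g n := by
  have hdg := pvDegB_congr f g n h
  cases hD : pvDegB g n with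
  | none => rw [pvNormF_eq_none f n (by rw [hdg, hD]), pvNormF_eq_none g n hD]
  | some D =>
    obtain ⟨hD1, _, _⟩ := pvDegB_eq_some g n D hD
    rw [pvNormF_eq_some f n D (by rw [hdg, hD]), pvNormF_eq_some g n D hD]
    congr 1
    exact List.map_congr_left (fun d hd => h d (by simp at hd; omega))

lemma pvNormF_ext (f : Nat → Int) (n m : Nat) (hnm : n ≤ m) (h : ∀ d, n ≤ d → f d = 0) :
    pvNormF f m = pvNormF f n := by
  have hdg := pvDegB_ext f n m hnm h
  cases hD : pvDegB f n with
  | none => rw [pvNormF_eq_none f m (by rw [hdg, hD]), pvNormF_eq_none f n hD]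
  | some D => rw [pvNormF_eq_some f m D (by rw [hdg, hD]), pvNormF_eq_some f n D hD]

lemma pvNormF_of_support (f : Nat → Int) (n m : Nat) (hn : ∀ d, n ≤ d → f d = 0)
    (hm : ∀ d, m ≤ d → f d = 0) : pvNormF f n = pvNormF f m := by
  rcases Nat.le_total n m with h | h
  · rw [pvNormF_ext f n m h hn]
  · rw [pvNormF_ext f m n h hm]

lemma pvNormF_zero (n : Nat) : pvNormF (fun _ => (0:Int)) n = [0] := by
  exact pvNormF_eq_none _ n ((pvDegB_eq_none_iff _ n).mpr (fun d _ => rfl))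

lemma map_range_getD (f : Nat → Int) (n d : Nat) :
    ((List.range n).map f).getD d 0 = if d < n then f d else 0 := by
  rcases Nat.lt_or_ge d n with h | h
  · rw [if_pos h, List.getD_eq_getElem _ _ (by simp only [List.length_map, List.length_range]; exact h)]
    simp
  · rw [if_neg (by omega), List.getD_eq_default _ _ (by simp only [List.length_map, List.length_range]; exact h)]

lemma pvToFun_normF (f : Nat → Int) (n : Nat) (h : ∀ d, n ≤ d → f d = 0) :
    pvToFun (pvNormF f n) = f := by
  funext d
  cases hD : pvDegB f n with
  | none =>
    have hall := (pvDegB_eq_none_iff f n).mp hD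
    have hfd : f d = 0 := by
      rcases Nat.lt_or_ge d n with h' | h'
      · exact hall d h'
      · exact h d h'
    rw [pvNormF_eq_none f n hD, hfd]
    rw [pvToFun_eq]
    rcases d with _ | d <;> simp
  | some D =>
    obtain ⟨h1, _, h3⟩ := pvDegB_eq_some f n D hD
    rw [pvNormF_eq_some f n D hD]
    unfold pvToFun
    rw [List.reverse_reverse, map_range_getD]
    split_ifs with hd
    · rfl
    · rcases Nat.lt_or_ge d n with h' | h'
      · exact (h3 d (by omega) h').symm
      · exact (h d h').symm

lemma self_eq_map_range (l : List Int) :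
    (List.range l.length).map (fun d => l.getD d 0) = l := by
  apply List.ext_getElem
  · simp
  · intro i h1 h2
    simp only [List.getElem_map, List.getElem_range]
    rw [List.getD_eq_getElem _ _ (by simpa using h2)]

lemma pvLeadZeros_cons (x : Int) (xs : List Int) :
    pvLeadZeros (x :: xs) = if x = 0 then pvLeadZeros xs + 1 else 0 := rfl

lemma pvNormRow_cons_zero (xs : List Int) : pvNormRow ((0:Int) :: xs) = pvNormRow xs := by
  show (if pvLeadZeros ((0:Int) :: xs) = (0 :: xs : List Int).length then [0]
        else ((0:Int) :: xs).drop (pvLeadZeros ((0:Int) :: xs))) = _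
  rw [pvLeadZeros_cons, if_pos rfl]
  show _ = (if pvLeadZeros xs = xs.length then [0] else xs.drop (pvLeadZeros xs))
  simp only [List.length_cons]
  split_ifs with h1 h2 h2
  · rfl
  · omega
  · omega
  · simp

lemma pvNormF_toFun_cons_zero (xs : List Int) :
    pvNormF (pvToFun ((0:Int) :: xs)) (xs.length + 1) = pvNormF (pvToFun xs) xs.length := by
  have hdeg : pvDegB (pvToFun ((0:Int) :: xs)) (xs.length + 1) = pvDegB (pvToFun xs) xs.length := by
    rw [pvDegB_succ, if_neg (by rw [pvToFun_cons]; simp)]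
    exact pvDegB_congr _ _ _ (fun d hd => by rw [pvToFun_cons, if_pos hd])
  cases hD : pvDegB (pvToFun xs) xs.length with
  | none =>
    rw [pvNormF_eq_none _ _ (by rw [hdeg, hD]), pvNormF_eq_none _ _ hD]
  | some D =>
    obtain ⟨h1, _, _⟩ := pvDegB_eq_some _ _ _ hD
    rw [pvNormF_eq_some _ _ D (by rw [hdeg, hD]), pvNormF_eq_some _ _ D hD]
    congr 1
    exact List.map_congr_left (fun d hd => by
      rw [pvToFun_cons, if_pos (by simp at hd; omega)])

lemma pvNormRow_eq (r : List Int) : pvNormRow r = pvNormF (pvToFun r) r.length := by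
  induction r with
  | nil => rfl
  | cons x xs ih =>
    by_cases hx : x = 0
    · subst hx
      rw [pvNormRow_cons_zero, ih]
      exact (pvNormF_toFun_cons_zero xs).symm
    · show (if pvLeadZeros (x :: xs) = (x :: xs : List Int).length then [0]
            else (x :: xs).drop (pvLeadZeros (x :: xs))) = _
      rw [pvLeadZeros_cons, if_neg hx, if_neg (by simp), List.drop_zero]
      have hdeg : pvDegB (pvToFun (x :: xs)) (x :: xs : List Int).length = some xs.length := by
        simp only [List.length_cons]
        rw [pvDegB_succ, if_pos (by rw [pvToFun_cons]; simp [hx])]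
      rw [pvNormF_eq_some _ _ _ hdeg]
      have hself : (List.range ((x :: xs : List Int).reverse.length)).map
          (fun d => (x :: xs : List Int).reverse.getD d 0) = (x :: xs : List Int).reverse :=
        self_eq_map_range _
      simp only [List.length_reverse, List.length_cons] at hself
      have : (List.range (xs.length + 1)).map (pvToFun (x :: xs)) = (x :: xs : List Int).reverse := hself
      rw [this, List.reverse_reverse]

-- ---- mult_local: the double update loop computes the y_pow-capped convolution ----

def pvCapConv (ra rb : List Int) (m : Int) (d : Nat) : Int :=
  if (d:Int) ≤ m then ∑ p ∈ Finset.range (d+1), pvToFun ra p * pvToFun rb (d-p) else 0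

lemma pvGetZ_toFun (r : List Int) (t : Nat) (ht : t < r.length) :
    pvGetZ r ((r.length:Int) - (t:Int) - 1) = pvToFun r t := by
  unfold pvGetZ
  have h1 : ((r.length:Int) - (t:Int) - 1).toNat = r.length - 1 - t := by omega
  rw [h1, pvToFun_eq, dif_pos ht, List.getD_eq_getElem _ _ (by omega)]

lemma pvAddAt_length (ans : List Int) (i : Int) (v : Int) :
    (pvAddAt ans i v).length = ans.length := by
  unfold pvAddAt; simp

lemma pvAddAt_toFun (ans : List Int) (q : Nat) (hq : q < ans.length) (v : Int) (d : Nat) :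
    pvToFun (pvAddAt ans (q:Int) v) d
      = pvToFun ans d + if d = ans.length - 1 - q then v else 0 := by
  unfold pvAddAt
  simp only [Int.toNat_natCast]
  have hgd : ans.getD q 0 = ans[q] := List.getD_eq_getElem _ _ hq
  rw [hgd, pvToFun_eq, pvToFun_eq]
  rcases Nat.lt_or_ge d ans.length with hd | hd
  · rw [dif_pos (by simpa using hd), dif_pos hd]
    simp only [List.length_set]
    rw [List.getElem_set]
    by_cases he : d = ans.length - 1 - q
    · rw [if_pos (by omega), if_pos he]
      subst he
      congr 2
      omega
    · rw [if_neg (by omega), if_neg he, add_zero]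
  · rw [dif_neg (by simp; omega), dif_neg (by omega), if_neg (by omega), add_zero]

lemma pvToFun_replicate_zero (n d : Nat) : pvToFun (List.replicate n (0:Int)) d = 0 := by
  rw [pvToFun_eq]
  split_ifs with h
  · simp
  · rfl

lemma foldl_pyRange_zero_toNat {α : Type} (x : Int) (f : α → Int → α) (init : α) :
    (PySem.List.pyRange 0 x 1).foldl f init
      = (List.range x.toNat).foldl (fun (acc : α) (k : Nat) => f acc (k:Int)) init := by
  rw [PySem.List.pyRange_one]
  simp [List.foldl_map]

lemma ml_inner (ra rb : List Int) (m : Int) (t : Nat)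
    (ht1 : t < ra.length) (ht2 : (t:Int) ≤ m) :
    ∀ (J : Nat) (ans : List Int)
      (hans : ans.length = (min ((ra.length:Int) + (rb.length:Int) - 1) (m+1)).toNat)
      (hJ : ∀ j, j < J → (j:Int) < min (m - (t:Int) + 1) ((rb.length:Int))),
      ((List.range J).foldl (fun (ans : List Int) (j : Nat) =>
        pvAddAt ans (min ((ra.length:Int) + (rb.length:Int) - 1) (m+1) - (t:Int) - (j:Int) - 1)
          (pvGetZ ra ((ra.length:Int) - (t:Int) - 1) * pvGetZ rb ((rb.length:Int) - (j:Int) - 1))) ans).length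
        = ans.length ∧
      ∀ d, pvToFun ((List.range J).foldl (fun (ans : List Int) (j : Nat) =>
        pvAddAt ans (min ((ra.length:Int) + (rb.length:Int) - 1) (m+1) - (t:Int) - (j:Int) - 1)
          (pvGetZ ra ((ra.length:Int) - (t:Int) - 1) * pvGetZ rb ((rb.length:Int) - (j:Int) - 1))) ans) d
        = pvToFun ans d +
          if t ≤ d ∧ d < t + J then pvToFun ra t * pvToFun rb (d - t) else 0 := by
  intro J
  induction J with
  | zero =>
    intro ans hans hJ
    constructor
    · rfl
    · intro d
      rw [if_neg (by omega), add_zero]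
      rfl
  | succ J ih =>
    intro ans hans hJ
    have hJJ := hJ J (by omega)
    have hlb : (J:Int) < (rb.length:Int) := by omega
    have hmt : (J:Int) < m - (t:Int) + 1 := by omega
    have hL : (t:Int) + (J:Int) + 1 ≤ min ((ra.length:Int) + (rb.length:Int) - 1) (m+1) := by
      have h1 : (t:Int) < (ra.length:Int) := by exact_mod_cast ht1
      omega
    obtain ⟨ihlen, ihfun⟩ := ih ans hans (fun j hj => hJ j (by omega))
    rw [List.range_succ, List.foldl_append, List.foldl_cons, List.foldl_nil]
    set resJ := (List.range J).foldl (fun (ans : List Int) (j : Nat) =>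
        pvAddAt ans (min ((ra.length:Int) + (rb.length:Int) - 1) (m+1) - (t:Int) - (j:Int) - 1)
          (pvGetZ ra ((ra.length:Int) - (t:Int) - 1) * pvGetZ rb ((rb.length:Int) - (j:Int) - 1))) ans
      with hres
    have hlenJ : resJ.length = ans.length := ihlen
    have hPQ : min ((ra.length:Int) + (rb.length:Int) - 1) (m+1) - (t:Int) - (J:Int) - 1
        = ((ans.length - 1 - (t + J) : Nat) : Int) := by
      rw [hans]; push_cast; omega
    have hq : ans.length - 1 - (t + J) < resJ.length := by
      rw [hlenJ, hans]; omega
    constructor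
    · rw [hPQ, pvAddAt_length, hlenJ]
    · intro d
      rw [hPQ, pvAddAt_toFun resJ _ hq, ihfun d]
      have hdeg : resJ.length - 1 - (ans.length - 1 - (t + J)) = t + J := by
        rw [hlenJ, hans]; omega
      rw [hdeg]
      rw [pvGetZ_toFun ra t ht1, pvGetZ_toFun rb J (by exact_mod_cast hlb)]
      by_cases hd : d = t + J
      · rw [if_pos hd, if_neg (by omega), if_pos (by omega)]
        subst hd
        have : t + J - t = J := by omega
        rw [this]
        ring
      · rw [if_neg hd]
        by_cases hd2 : t ≤ d ∧ d < t + J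
        · rw [if_pos hd2, if_pos (by omega), add_zero]
        · rw [if_neg hd2, if_neg (by omega), add_zero]

lemma ml_outer (ra rb : List Int) (m : Int) :
    ∀ (T : Nat) (ans : List Int)
      (hans : ans.length = (min ((ra.length:Int) + (rb.length:Int) - 1) (m+1)).toNat)
      (hT : ∀ t, t < T → (t:Int) < min ((ra.length:Int)) (m+1)),
      ((List.range T).foldl (fun (ans : List Int) (t : Nat) =>
        (List.range ((min (m - (t:Int) + 1) ((rb.length:Int))).toNat)).foldl
          (fun (ans : List Int) (j : Nat) => pvAddAt ans (min ((ra.length:Int) + (rb.length:Int) - 1) (m+1) - (t:Int) - (j:Int) - 1)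
            (pvGetZ ra ((ra.length:Int) - (t:Int) - 1) * pvGetZ rb ((rb.length:Int) - (j:Int) - 1))) ans) ans).length
        = ans.length ∧
      ∀ d, pvToFun ((List.range T).foldl (fun (ans : List Int) (t : Nat) =>
        (List.range ((min (m - (t:Int) + 1) ((rb.length:Int))).toNat)).foldl
          (fun (ans : List Int) (j : Nat) => pvAddAt ans (min ((ra.length:Int) + (rb.length:Int) - 1) (m+1) - (t:Int) - (j:Int) - 1)
            (pvGetZ ra ((ra.length:Int) - (t:Int) - 1) * pvGetZ rb ((rb.length:Int) - (j:Int) - 1))) ans) ans) d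
        = pvToFun ans d +
          ∑ i ∈ Finset.range T,
            (if i ≤ d ∧ d < i + (min (m - (i:Int) + 1) ((rb.length:Int))).toNat
              then pvToFun ra i * pvToFun rb (d - i) else 0) := by
  intro T
  induction T with
  | zero =>
    intro ans hans hT
    exact ⟨rfl, fun d => by simp⟩
  | succ T ih =>
    intro ans hans hT
    obtain ⟨ihlen, ihfun⟩ := ih ans hans (fun t h => hT t (by omega))
    rw [List.range_succ, List.foldl_append, List.foldl_cons, List.foldl_nil]
    set resT := (List.range T).foldl (fun (ans : List Int) (t : Nat) =>
        (List.range ((min (m - (t:Int) + 1) ((rb.length:Int))).toNat)).foldl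
          (fun (ans : List Int) (j : Nat) => pvAddAt ans (min ((ra.length:Int) + (rb.length:Int) - 1) (m+1) - (t:Int) - (j:Int) - 1)
            (pvGetZ ra ((ra.length:Int) - (t:Int) - 1) * pvGetZ rb ((rb.length:Int) - (j:Int) - 1))) ans) ans
      with hres
    have hTT := hT T (by omega)
    have ht1 : T < ra.length := by
      have : (T:Int) < (ra.length:Int) := by omega
      exact_mod_cast this
    have ht2 : (T:Int) ≤ m := by omega
    obtain ⟨ilen, ifun⟩ := ml_inner ra rb m T ht1 ht2
      ((min (m - (T:Int) + 1) ((rb.length:Int))).toNat) resT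
      (by rw [ihlen, hans]) (by intro j hj; omega)
    constructor
    · rw [ilen, ihlen]
    · intro d
      rw [ifun d, ihfun d, Finset.sum_range_succ]
      ring

lemma sum_ite_eq_capConv (ra rb : List Int) (m : Int) (d : Nat) :
    (∑ i ∈ Finset.range ((min ((ra.length:Int)) (m+1)).toNat),
      (if i ≤ d ∧ d < i + (min (m - (i:Int) + 1) ((rb.length:Int))).toNat
        then pvToFun ra i * pvToFun rb (d - i) else 0))
    = pvCapConv ra rb m d := by
  unfold pvCapConv
  by_cases hm : (d:Int) ≤ m
  · rw [if_pos hm]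
    set T := (min ((ra.length:Int)) (m+1)).toNat with hT
    set N := max T (d+1) with hN
    have hvan1 : ∀ i ∈ Finset.range N, i ∉ Finset.range T →
        (if i ≤ d ∧ d < i + (min (m - (i:Int) + 1) ((rb.length:Int))).toNat
          then pvToFun ra i * pvToFun rb (d - i) else 0) = 0 := by
      intro i _ hi2
      have hTi : T ≤ i := by
        by_contra hcon
        exact hi2 (Finset.mem_range.mpr (by omega))
      split_ifs with hc
      · obtain ⟨hc1, _⟩ := hc
        have h0 : min ((ra.length:Int)) (m+1) ≤ (i:Int) := by
          refine le_trans (Int.self_le_toNat _) ?_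
          rw [← hT]
          exact_mod_cast hTi
        rcases min_le_iff.mp h0 with hcase | hcase
        · rw [pvToFun_zero_of_ge ra i (by exact_mod_cast hcase), zero_mul]
        · omega
      · rfl
    have hvan2 : ∀ i ∈ Finset.range N, i ∉ Finset.range (d+1) →
        (if i ≤ d then pvToFun ra i * pvToFun rb (d - i) else 0) = 0 := by
      intro i _ hi2
      rw [if_neg (by simp at hi2; omega)]
    have hTN : T ≤ N := by rw [hN]; exact le_max_left _ _
    have hsub1 : Finset.range T ⊆ Finset.range N := Finset.range_subset_range.mpr hTN
    rw [Finset.sum_subset hsub1 hvan1]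
    have e2 : (∑ p ∈ Finset.range (d+1), pvToFun ra p * pvToFun rb (d-p))
        = ∑ i ∈ Finset.range N, (if i ≤ d then pvToFun ra i * pvToFun rb (d - i) else 0) := by
      have hdN : d + 1 ≤ N := by rw [hN]; exact le_max_right _ _
      have hsub2 : Finset.range (d+1) ⊆ Finset.range N := Finset.range_subset_range.mpr hdN
      rw [← Finset.sum_subset hsub2 hvan2]
      exact Finset.sum_congr rfl (fun i hi => by rw [if_pos (by simp at hi; omega)])
    rw [e2]
    apply Finset.sum_congr rfl
    intro i _
    by_cases hc : i ≤ d ∧ d < i + (min (m - (i:Int) + 1) ((rb.length:Int))).toNat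
    · rw [if_pos hc, if_pos hc.1]
    · split_ifs with hd2
      · -- i ≤ d but the inner window ended: the rb factor vanishes
        have hge : (min (m - (i:Int) + 1) ((rb.length:Int))).toNat ≤ d - i := by omega
        have h0 : min (m - (i:Int) + 1) ((rb.length:Int)) ≤ ((d - i : Nat):Int) := by
          refine le_trans (Int.self_le_toNat _) ?_
          exact_mod_cast hge
        rcases min_le_iff.mp h0 with hcase | hcase
        · omega
        · rw [pvToFun_zero_of_ge rb (d - i) (by exact_mod_cast hcase), mul_zero]
      · rfl
  · rw [if_neg hm]
    apply Finset.sum_eq_zero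
    intro i _
    split_ifs with hc
    · obtain ⟨hc1, hc2⟩ := hc
      rcases le_total 0 (min (m - (i:Int) + 1) ((rb.length:Int))) with hp | hp
      · have he : ((min (m - (i:Int) + 1) ((rb.length:Int))).toNat : Int)
            = min (m - (i:Int) + 1) ((rb.length:Int)) := Int.toNat_of_nonneg hp
        have hub : min (m - (i:Int) + 1) ((rb.length:Int)) ≤ m - (i:Int) + 1 := min_le_left _ _
        have : (d:Int) < (i:Int) + (m - (i:Int) + 1) := by
          have hcast : (d:Int) < (i:Int) + ((min (m - (i:Int) + 1) ((rb.length:Int))).toNat : Int) := by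
            exact_mod_cast hc2
          omega
        omega
      · have he : (min (m - (i:Int) + 1) ((rb.length:Int))).toNat = 0 := Int.toNat_of_nonpos hp
        omega
    · rfl

lemma mult_local_spec (ra rb : List Int) (m : Int) :
    mult_local ra rb m
      = pvNormF (pvCapConv ra rb m) ((min ((ra.length:Int) + (rb.length:Int) - 1) (m+1)).toNat) := by
  simp only [mult_local]
  simp only [foldl_pyRange_zero_toNat]
  obtain ⟨hlen, hfun⟩ := ml_outer ra rb m ((min ((ra.length:Int)) (m+1)).toNat)
    (List.replicate ((min ((ra.length:Int) + (rb.length:Int) - 1) (m+1)).toNat) 0)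
    (by simp)
    (fun t ht => by
      rcases le_total ((ra.length:Int)) (m+1) with hc | hc
      · rw [min_eq_left hc] at ht ⊢; omega
      · rw [min_eq_right hc] at ht ⊢; omega)
  rw [pvNormRow_eq, hlen]
  simp only [List.length_replicate]
  apply pvNormF_congr
  intro d _
  rw [hfun d, pvToFun_replicate_zero, zero_add, sum_ite_eq_capConv]

-- ---- add_local: tail-aligned addition then normalization ----

lemma foldl_pyRange_countdown {α : Type} (n : Nat) (f : α → Int → α) (init : α) :
    (PySem.List.pyRange ((n:Int) - 1) (-1) (-1)).foldl f init
      = (List.range n).foldl (fun (acc : α) (k : Nat) => f acc ((n:Int) - 1 - (k:Int))) init := by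
  rw [PySem.List.pyRange_neg_one]
  have h : ((n:Int) - 1 - (-1)).toNat = n := by omega
  rw [h, List.foldl_map]

lemma al_loop (a' b' : List Int) (hba : b'.length ≤ a'.length) :
    ∀ (c : Nat), c ≤ b'.length →
      ((List.range c).foldl (fun (st : List Int × Int) (k : Nat) =>
          (pvAddAt st.1 st.2 (pvGetZ b' ((b'.length:Int) - 1 - (k:Int))), st.2 - 1))
          (a', (a'.length : Int) - 1)).2 = (a'.length : Int) - 1 - (c:Int) ∧
      ((List.range c).foldl (fun (st : List Int × Int) (k : Nat) =>
          (pvAddAt st.1 st.2 (pvGetZ b' ((b'.length:Int) - 1 - (k:Int))), st.2 - 1))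
          (a', (a'.length : Int) - 1)).1.length = a'.length ∧
      ∀ d, pvToFun ((List.range c).foldl (fun (st : List Int × Int) (k : Nat) =>
          (pvAddAt st.1 st.2 (pvGetZ b' ((b'.length:Int) - 1 - (k:Int))), st.2 - 1))
          (a', (a'.length : Int) - 1)).1 d
        = pvToFun a' d + (if d < c then pvToFun b' d else 0) := by
  intro c
  induction c with
  | zero =>
    intro _
    simp only [List.range_zero, List.foldl_nil]
    refine ⟨?_, ?_, ?_⟩
    · show (a'.length : Int) - 1 = (a'.length : Int) - 1 - ((0:Nat):Int)
      push_cast; ring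
    · trivial
    · intro d
      rw [if_neg (by omega), add_zero]
  | succ c ih =>
    intro hc
    obtain ⟨ihind, ihlen, ihfun⟩ := ih (by omega)
    rw [List.range_succ, List.foldl_append, List.foldl_cons, List.foldl_nil]
    set stC := (List.range c).foldl (fun (st : List Int × Int) (k : Nat) =>
          (pvAddAt st.1 st.2 (pvGetZ b' ((b'.length:Int) - 1 - (k:Int))), st.2 - 1))
          (a', (a'.length : Int) - 1) with hst
    have hcb : c < b'.length := by omega
    have hca : c < a'.length := by omega
    have hindq : stC.2 = ((a'.length - 1 - c : Nat) : Int) := by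
      rw [ihind]; omega
    have hv : pvGetZ b' ((b'.length:Int) - 1 - (c:Int)) = pvToFun b' c := by
      have he : (b'.length:Int) - 1 - (c:Int) = (b'.length:Int) - (c:Int) - 1 := by ring
      rw [he, pvGetZ_toFun b' c hcb]
    refine ⟨?_, ?_, ?_⟩
    · show stC.2 - 1 = (a'.length : Int) - 1 - ((c+1 : Nat) : Int)
      rw [ihind]; push_cast; ring
    · show (pvAddAt stC.1 stC.2 _).length = a'.length
      rw [hindq, pvAddAt_length, ihlen]
    · intro d
      simp only [hindq, hv]
      rw [pvAddAt_toFun stC.1 (a'.length - 1 - c) (by rw [ihlen]; omega) _ d, ihfun d]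
      have hdeg : stC.1.length - 1 - (a'.length - 1 - c) = c := by rw [ihlen]; omega
      rw [hdeg]
      by_cases hd : d = c
      · subst hd
        rw [if_neg (lt_irrefl d), if_pos rfl, if_pos (Nat.lt_succ_self d)]
        ring
      · by_cases hd2 : d < c
        · rw [if_pos hd2, if_neg hd, if_pos (by omega : d < c + 1), add_zero]
        · rw [if_neg hd2, if_neg hd, if_neg (by omega : ¬ d < c + 1), add_zero]

lemma add_local_spec (x y : List Int) :
    add_local x y = pvNormF (fun d => pvToFun x d + pvToFun y d) (max x.length y.length) := by
  simp only [add_local]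
  split_ifs with hswap
  all_goals simp only []
  · -- swapped: a' = y, b' = x
    rw [foldl_pyRange_countdown x.length
      (fun (st : List Int × Int) i => (pvAddAt st.1 st.2 (pvGetZ x i), st.2 - 1)) (y, (y.length:Int) - 1)]
    obtain ⟨_, hlen, hfun⟩ := al_loop y x (by omega) x.length (le_refl _)
    rw [pvNormRow_eq, hlen]
    have hmax : y.length = max x.length y.length := (max_eq_right (by omega)).symm
    rw [← hmax]
    apply pvNormF_congr
    intro d _
    rw [hfun d]
    by_cases hd : d < x.length
    · rw [if_pos hd]; ring
    · rw [if_neg hd, pvToFun_zero_of_ge x d (by omega)]; ring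
  · rw [foldl_pyRange_countdown y.length
      (fun (st : List Int × Int) i => (pvAddAt st.1 st.2 (pvGetZ y i), st.2 - 1)) (x, (x.length:Int) - 1)]
    obtain ⟨_, hlen, hfun⟩ := al_loop x y (by omega) y.length (le_refl _)
    rw [pvNormRow_eq, hlen]
    have hmax : x.length = max x.length y.length := (max_eq_left (by omega)).symm
    rw [← hmax]
    apply pvNormF_congr
    intro d _
    rw [hfun d]
    by_cases hd : d < y.length
    · rw [if_pos hd]
    · rw [if_neg hd, pvToFun_zero_of_ge y d (by omega), add_zero]

-- ---- mult_global (A): the nested update loop, cell by cell ----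

def pvMl (a b : List (List Int)) (y : Int) (s i : Nat) : List Int :=
  mult_local (a.getD i []) (b.getD (s - i) []) y

def pvRowUpTo (a b : List (List Int)) (y : Int) (s t : Nat) : List Int :=
  ((List.range t).filter (fun i => decide (i ≤ s ∧ s - i < b.length))).foldl
    (fun r i => add_local r (pvMl a b y s i)) [0]

lemma pvGetRow_natCast (xs : List (List Int)) (i : Nat) :
    pvGetRow xs (i:Int) = xs.getD i [] := by
  unfold pvGetRow; simp

lemma getD_set_rows (l : List (List Int)) (n : Nat) (v : List Int) (s : Nat) :
    (l.set n v).getD s [] = if s = n ∧ n < l.length then v else l.getD s [] := by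
  by_cases h1 : s < l.length
  · rw [List.getD_eq_getElem _ _ (by simpa using h1), List.getElem_set]
    by_cases h2 : s = n
    · subst h2
      rw [if_pos rfl, if_pos ⟨rfl, h1⟩]
    · rw [if_neg (fun he => h2 he.symm), if_neg (by tauto), List.getD_eq_getElem _ _ h1]
  · rw [List.getD_eq_default _ _ (by simpa using h1), if_neg (by omega),
      List.getD_eq_default _ _ (by omega)]

lemma getD_replicate_rows (n s : Nat) (hs : s < n) :
    (List.replicate n ([0] : List Int)).getD s [] = [0] := by
  rw [List.getD_eq_getElem _ _ (by simpa using hs)]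
  simp

lemma rowUpTo_succ (a b : List (List Int)) (y : Int) (s T : Nat) :
    pvRowUpTo a b y s (T+1)
      = if T ≤ s ∧ s - T < b.length
        then add_local (pvRowUpTo a b y s T) (pvMl a b y s T)
        else pvRowUpTo a b y s T := by
  unfold pvRowUpTo
  rw [List.range_succ, List.filter_append]
  by_cases hp : T ≤ s ∧ s - T < b.length
  · rw [if_pos hp]
    have : List.filter (fun i => decide (i ≤ s ∧ s - i < b.length)) [T] = [T] := by
      simp [hp]
    rw [this, List.foldl_append, List.foldl_cons, List.foldl_nil]
  · rw [if_neg hp]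
    have : List.filter (fun i => decide (i ≤ s ∧ s - i < b.length)) [T] = [] := by
      simp [hp]
    rw [this, List.append_nil]

set_option maxHeartbeats 1000000 in
lemma mg_inner (a b : List (List Int)) (x_size y : Int) (t : Nat) (ht : t < a.length) :
    ∀ (u : Nat), u ≤ b.length → ∀ (ans : List (List Int)),
      ans.length = ((a.length:Int) + (b.length:Int) - 1).toNat →
      ((List.range u).foldl (fun (ans : List (List Int)) (j : Nat) =>
        if (a.length:Int) + (b.length:Int) - 1 - x_size ≤ (t:Int) + (j:Int) then
          ans.set ((t:Int) + (j:Int)).toNat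
            (add_local (pvGetRow ans ((t:Int) + (j:Int)))
              (mult_local (pvGetRow a (t:Int)) (pvGetRow b (j:Int)) y))
        else ans) ans).length = ans.length ∧
      ∀ s : Nat, ((List.range u).foldl (fun (ans : List (List Int)) (j : Nat) =>
        if (a.length:Int) + (b.length:Int) - 1 - x_size ≤ (t:Int) + (j:Int) then
          ans.set ((t:Int) + (j:Int)).toNat
            (add_local (pvGetRow ans ((t:Int) + (j:Int)))
              (mult_local (pvGetRow a (t:Int)) (pvGetRow b (j:Int)) y))
        else ans) ans).getD s []
        = if t ≤ s ∧ s - t < u ∧ (a.length:Int) + (b.length:Int) - 1 - x_size ≤ (s:Int)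
          then add_local (ans.getD s []) (pvMl a b y s t) else ans.getD s [] := by
  intro u
  induction u with
  | zero =>
    intro _ ans hans
    simp only [List.range_zero, List.foldl_nil]
    refine ⟨trivial, fun s => ?_⟩
    rw [if_neg (by omega)]
  | succ u ih =>
    intro hu ans hans
    obtain ⟨ihlen, ihget⟩ := ih (by omega) ans hans
    rw [List.range_succ, List.foldl_append, List.foldl_cons, List.foldl_nil]
    set resU := (List.range u).foldl (fun (ans : List (List Int)) (j : Nat) =>
        if (a.length:Int) + (b.length:Int) - 1 - x_size ≤ (t:Int) + (j:Int) then
          ans.set ((t:Int) + (j:Int)).toNat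
            (add_local (pvGetRow ans ((t:Int) + (j:Int)))
              (mult_local (pvGetRow a (t:Int)) (pvGetRow b (j:Int)) y))
        else ans) ans with hres
    by_cases hcond : (a.length:Int) + (b.length:Int) - 1 - x_size ≤ (t:Int) + (u:Int)
    · rw [if_pos hcond]
      constructor
      · rw [List.length_set, ihlen]
      · intro s
        have hcast : (t:Int) + (u:Int) = (((t + u : Nat)) : Int) := by push_cast; ring
        have h1 : ((t:Int) + (u:Int)).toNat = t + u := by omega
        have hinner : resU.getD (t+u) [] = ans.getD (t+u) [] := by
          rw [ihget (t+u), if_neg (by omega)]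
        rw [h1, hcast, pvGetRow_natCast a t, pvGetRow_natCast b u, pvGetRow_natCast resU (t+u)]
        rw [getD_set_rows, hinner, ihget s]
        by_cases hs : s = t + u
        · subst hs
          have hml : pvMl a b y (t+u) t = mult_local (a.getD t []) (b.getD u []) y := by
            unfold pvMl; rw [Nat.add_sub_cancel_left]
          rw [← hml]
          split_ifs <;> first | omega | rfl
        · split_ifs <;> first | omega | rfl
    · rw [if_neg hcond]
      refine ⟨ihlen, fun s => ?_⟩
      rw [ihget s]
      split_ifs <;> first | omega | rfl

set_option maxHeartbeats 1000000 in
lemma mg_outer (a b : List (List Int)) (x_size y : Int) :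
    ∀ (T : Nat), T ≤ a.length →
      ((List.range T).foldl (fun (ans : List (List Int)) (t : Nat) =>
        (List.range b.length).foldl (fun (ans : List (List Int)) (j : Nat) =>
          if (a.length:Int) + (b.length:Int) - 1 - x_size ≤ (t:Int) + (j:Int) then
            ans.set ((t:Int) + (j:Int)).toNat
              (add_local (pvGetRow ans ((t:Int) + (j:Int)))
                (mult_local (pvGetRow a (t:Int)) (pvGetRow b (j:Int)) y))
          else ans) ans)
        (List.replicate (((a.length:Int) + (b.length:Int) - 1).toNat) [0])).length
        = ((a.length:Int) + (b.length:Int) - 1).toNat ∧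
      ∀ s : Nat, s < ((a.length:Int) + (b.length:Int) - 1).toNat →
        ((List.range T).foldl (fun (ans : List (List Int)) (t : Nat) =>
          (List.range b.length).foldl (fun (ans : List (List Int)) (j : Nat) =>
            if (a.length:Int) + (b.length:Int) - 1 - x_size ≤ (t:Int) + (j:Int) then
              ans.set ((t:Int) + (j:Int)).toNat
                (add_local (pvGetRow ans ((t:Int) + (j:Int)))
                  (mult_local (pvGetRow a (t:Int)) (pvGetRow b (j:Int)) y))
            else ans) ans)
          (List.replicate (((a.length:Int) + (b.length:Int) - 1).toNat) [0])).getD s []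
          = if (a.length:Int) + (b.length:Int) - 1 - x_size ≤ (s:Int)
            then pvRowUpTo a b y s T else [0] := by
  intro T
  induction T with
  | zero =>
    intro _
    simp only [List.range_zero, List.foldl_nil]
    refine ⟨by simp, fun s hs => ?_⟩
    rw [getD_replicate_rows _ _ hs]
    unfold pvRowUpTo
    simp
  | succ T ih =>
    intro hT
    obtain ⟨ihlen, ihget⟩ := ih (by omega)
    rw [List.range_succ, List.foldl_append, List.foldl_cons, List.foldl_nil]
    set resT := ((List.range T).foldl (fun (ans : List (List Int)) (t : Nat) =>
        (List.range b.length).foldl (fun (ans : List (List Int)) (j : Nat) =>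
          if (a.length:Int) + (b.length:Int) - 1 - x_size ≤ (t:Int) + (j:Int) then
            ans.set ((t:Int) + (j:Int)).toNat
              (add_local (pvGetRow ans ((t:Int) + (j:Int)))
                (mult_local (pvGetRow a (t:Int)) (pvGetRow b (j:Int)) y))
          else ans) ans)
        (List.replicate (((a.length:Int) + (b.length:Int) - 1).toNat) [0])) with hres
    obtain ⟨ilen, iget⟩ := mg_inner a b x_size y T (by omega) b.length (le_refl _) resT ihlen
    refine ⟨by rw [ilen, ihlen], fun s hs => ?_⟩
    rw [iget s, ihget s hs, rowUpTo_succ]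
    split_ifs <;> first | omega | rfl

-- ---- folding add_local over normalized rows = normalized sum ----

lemma pvNormF_support_out (f : Nat → Int) (n : Nat) (h : ∀ e, n ≤ e → f e = 0) :
    ∀ d, (pvNormF f n).length ≤ d → f d = 0 := by
  intro d hd
  cases hD : pvDegB f n with
  | none =>
    rcases Nat.lt_or_ge d n with h' | h'
    · exact (pvDegB_eq_none_iff f n).mp hD d h'
    · exact h d h'
  | some D =>
    obtain ⟨h1, _, h3⟩ := pvDegB_eq_some f n D hD
    rw [pvNormF_eq_some f n D hD] at hd
    simp only [List.length_reverse, List.length_map, List.length_range] at hd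
    rcases Nat.lt_or_ge d n with h' | h'
    · exact h3 d (by omega) h'
    · exact h d h'

lemma add_local_normF (f g : Nat → Int) (nf ng M : Nat)
    (hf : ∀ d, nf ≤ d → f d = 0) (hg : ∀ d, ng ≤ d → g d = 0)
    (hfM : ∀ d, M ≤ d → f d = 0) (hgM : ∀ d, M ≤ d → g d = 0) :
    add_local (pvNormF f nf) (pvNormF g ng) = pvNormF (fun d => f d + g d) M := by
  rw [add_local_spec, pvToFun_normF f nf hf, pvToFun_normF g ng hg]
  apply pvNormF_of_support
  · intro d hd
    rw [pvNormF_support_out f nf hf d (le_trans (le_max_left _ _) hd),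
      pvNormF_support_out g ng hg d (le_trans (le_max_right _ _) hd), add_zero]
  · intro d hd
    rw [hfM d hd, hgM d hd, add_zero]

lemma capConv_support (ra rb : List Int) (y : Int) (d : Nat)
    (h : (ra.length:Int) + (rb.length:Int) - 1 ≤ (d:Int) ∨ y < (d:Int)) :
    pvCapConv ra rb y d = 0 := by
  unfold pvCapConv
  rcases h with h | h
  · split_ifs with hy
    · apply Finset.sum_eq_zero
      intro p hp
      simp only [Finset.mem_range] at hp
      by_cases hpa : p < ra.length
      · rw [pvToFun_zero_of_ge rb (d - p) (by omega), mul_zero]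
      · rw [pvToFun_zero_of_ge ra p (by omega), zero_mul]
    · rfl
  · rw [if_neg (by omega)]

lemma capConv_support_len (ra rb : List Int) (y : Int) :
    ∀ d, ((min ((ra.length:Int) + (rb.length:Int) - 1) (y+1)).toNat) ≤ d →
      pvCapConv ra rb y d = 0 := by
  intro d hd
  apply capConv_support
  have h0 : min ((ra.length:Int) + (rb.length:Int) - 1) (y+1) ≤ (d:Int) :=
    le_trans (Int.self_le_toNat _) (by exact_mod_cast hd)
  rcases min_le_iff.mp h0 with h | h
  · left; exact h
  · right; omega

def pvBoundI (a b : List (List Int)) (y : Int) : Int :=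
  max 0 (min (y + 1)
    ((a.foldl (fun m r => max m (r.length:Int)) 0) + (b.foldl (fun m r => max m (r.length:Int)) 0) - 1))

lemma capConv_support_M (a b : List (List Int)) (y : Int) (s i d : Nat)
    (hd : (pvBoundI a b y).toNat ≤ d) :
    pvCapConv (a.getD i []) (b.getD (s-i) []) y d = 0 := by
  apply capConv_support
  have h0 : pvBoundI a b y ≤ (d:Int) :=
    le_trans (Int.self_le_toNat _) (by exact_mod_cast hd)
  unfold pvBoundI at h0
  have h1 : min (y + 1)
      ((a.foldl (fun m r => max m (r.length:Int)) 0) + (b.foldl (fun m r => max m (r.length:Int)) 0) - 1)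
      ≤ (d:Int) := le_trans (le_max_right _ _) h0
  rcases min_le_iff.mp h1 with h | h
  · right; omega
  · left
    obtain ⟨ha0, hamem⟩ := PySem.List.le_foldl_max_int a (fun r => (r.length:Int)) 0
    obtain ⟨hb0, hbmem⟩ := PySem.List.le_foldl_max_int b (fun r => (r.length:Int)) 0
    have hla : ((a.getD i []).length : Int) ≤ a.foldl (fun m r => max m (r.length:Int)) 0 := by
      by_cases hi : i < a.length
      · rw [List.getD_eq_getElem _ _ (by simpa using hi)]
        exact hamem _ (List.getElem_mem hi)
      · rw [List.getD_eq_default _ _ (by omega)]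
        simpa using ha0
    have hlb : ((b.getD (s-i) []).length : Int) ≤ b.foldl (fun m r => max m (r.length:Int)) 0 := by
      by_cases hi : s - i < b.length
      · rw [List.getD_eq_getElem _ _ (by simpa using hi)]
        exact hbmem _ (List.getElem_mem hi)
      · rw [List.getD_eq_default _ _ (by omega)]
        simpa using hb0
    omega

lemma fold_addlocal (a b : List (List Int)) (y : Int) (s : Nat) :
    ∀ (I : List Nat) (f₀ : Nat → Int) (hf : ∀ d, (pvBoundI a b y).toNat ≤ d → f₀ d = 0),
      I.foldl (fun r i => add_local r (pvMl a b y s i)) (pvNormF f₀ ((pvBoundI a b y).toNat))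
        = pvNormF (fun d => f₀ d +
            (I.map (fun i => pvCapConv (a.getD i []) (b.getD (s-i) []) y d)).sum)
          ((pvBoundI a b y).toNat) := by
  intro I
  induction I with
  | nil =>
    intro f₀ hf
    simp only [List.foldl_nil, List.map_nil, List.sum_nil]
    exact (pvNormF_congr _ _ _ (fun d _ => by ring)).symm
  | cons i I ih =>
    intro f₀ hf
    rw [List.foldl_cons]
    have hstep : add_local (pvNormF f₀ ((pvBoundI a b y).toNat)) (pvMl a b y s i)
        = pvNormF (fun d => f₀ d + pvCapConv (a.getD i []) (b.getD (s-i) []) y d)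
            ((pvBoundI a b y).toNat) := by
      unfold pvMl
      rw [mult_local_spec]
      exact add_local_normF f₀ _ _ _ _ hf (capConv_support_len _ _ y) hf
        (fun d hd => capConv_support_M a b y s i d hd)
    rw [hstep, ih _ (fun d hd => by
      rw [hf d hd, capConv_support_M a b y s i d hd, add_zero])]
    apply pvNormF_congr
    intro d _
    simp only [List.map_cons, List.sum_cons]
    ring

lemma rowA_norm (a b : List (List Int)) (y : Int) (s : Nat) :
    pvRowUpTo a b y s a.length
      = pvNormF (fun d => (((List.range a.length).filter
            (fun i => decide (i ≤ s ∧ s - i < b.length))).map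
            (fun i => pvCapConv (a.getD i []) (b.getD (s-i) []) y d)).sum)
          ((pvBoundI a b y).toNat) := by
  unfold pvRowUpTo
  have h0 : ([0] : List Int) = pvNormF (fun _ => 0) ((pvBoundI a b y).toNat) :=
    (pvNormF_zero _).symm
  rw [h0, fold_addlocal a b y s _ _ (fun _ _ => rfl)]
  apply pvNormF_congr
  intro d _
  rw [zero_add]

-- ---- B side: the window range, the direct coefficient sum, the row rebuild ----

lemma pyRange_window (la lb s : Nat) :
    PySem.List.pyRange (max 0 ((s:Int) - (lb:Int) + 1)) (min ((la:Int)) ((s:Int) + 1)) 1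
      = ((List.range la).filter (fun i => decide (i ≤ s ∧ s - i < lb))).map
          (fun (i : Nat) => (i : Int)) := by
  induction la with
  | zero =>
    rw [PySem.List.pyRange_one_eq_nil (by simp)]
    simp
  | succ la ih =>
    rw [List.range_succ, List.filter_append, List.map_append]
    by_cases hp : la ≤ s ∧ s - la < lb
    · have h1 : List.filter (fun i => decide (i ≤ s ∧ s - i < lb)) [la] = [la] := by
        simp [hp]
      rw [h1]
      have hmin1 : min (((la+1 : Nat)):Int) ((s:Int) + 1) = ((la:Int)) + 1 := by
        push_cast; omega
      have hmin2 : min (((la : Nat)):Int) ((s:Int) + 1) = (la:Int) := by omega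
      have hlo : max 0 ((s:Int) - (lb:Int) + 1) ≤ (la:Int) := by omega
      rw [hmin1, PySem.List.pyRange_one_succ_right hlo]
      rw [hmin2] at ih
      rw [ih]
      simp
    · have h1 : List.filter (fun i => decide (i ≤ s ∧ s - i < lb)) [la] = [] := by
        simp only [List.filter_cons, List.filter_nil]
        rw [if_neg (by simpa using hp)]
      rw [h1, List.map_nil, List.append_nil]
      by_cases hs2 : s < la
      · have hmm : min (((la+1 : Nat)):Int) ((s:Int) + 1) = min (((la : Nat)):Int) ((s:Int) + 1) := by
          push_cast; omega
        rw [hmm, ih]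
      · have hla : la ≤ s := by omega
        have hge : lb ≤ s - la := by omega
        rw [PySem.List.pyRange_one_eq_nil (by push_cast; omega), ← ih,
          PySem.List.pyRange_one_eq_nil (by push_cast; omega)]

lemma sum_filter_range (n : Nat) (p : Nat → Bool) (g : Nat → Int) :
    (((List.range n).filter p).map g).sum
      = ∑ i ∈ Finset.range n, (if p i then g i else 0) := by
  induction n with
  | zero => simp
  | succ n ih =>
    rw [List.range_succ, List.filter_append, List.map_append, List.sum_append,
      Finset.sum_range_succ, ih]
    by_cases hp : p n
    · simp [hp]
    · simp [hp]

lemma conv_filter_sum (ra rb : List Int) (d : Nat) :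
    (((List.range ra.length).filter (fun p => decide (p ≤ d ∧ d - p < rb.length))).map
      (fun p => pvToFun ra p * pvToFun rb (d-p))).sum
    = ∑ p ∈ Finset.range (d+1), pvToFun ra p * pvToFun rb (d-p) := by
  rw [sum_filter_range]
  set N := max ra.length (d+1) with hN
  have hvan1 : ∀ p ∈ Finset.range N, p ∉ Finset.range ra.length →
      (if (decide (p ≤ d ∧ d - p < rb.length) : Bool) then pvToFun ra p * pvToFun rb (d-p) else 0) = 0 := by
    intro p _ hp2
    split_ifs with hc
    · rw [pvToFun_zero_of_ge ra p (by simp at hp2; omega), zero_mul]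
    · rfl
  have hvan2 : ∀ p ∈ Finset.range N, p ∉ Finset.range (d+1) →
      (if p ≤ d then pvToFun ra p * pvToFun rb (d-p) else 0) = 0 := by
    intro p _ hp2
    rw [if_neg (by simp at hp2; omega)]
  rw [Finset.sum_subset (Finset.range_subset_range.mpr (le_max_left _ _)) hvan1]
  have e2 : (∑ p ∈ Finset.range (d+1), pvToFun ra p * pvToFun rb (d-p))
      = ∑ p ∈ Finset.range N, (if p ≤ d then pvToFun ra p * pvToFun rb (d-p) else 0) := by
    rw [← Finset.sum_subset (Finset.range_subset_range.mpr (le_max_right _ _)) hvan2]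
    exact Finset.sum_congr rfl (fun p hp => by rw [if_pos (by simp at hp; omega)])
  rw [e2]
  apply Finset.sum_congr rfl
  intro p _
  by_cases h1 : p ≤ d ∧ d - p < rb.length
  · rw [if_pos (by simpa using h1), if_pos h1.1]
  · by_cases h2 : p ≤ d
    · rw [if_neg (by simpa using h1), if_pos h2, pvToFun_zero_of_ge rb (d-p) (by omega)]
      ring
    · rw [if_neg (by simpa using h1), if_neg h2]

lemma pvCoeff_eq (a b : List (List Int)) (s d : Nat) :
    pvCoeff a b (s:Int) (d:Int)
      = (((List.range a.length).filter (fun i => decide (i ≤ s ∧ s - i < b.length))).map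
          (fun i => ∑ p ∈ Finset.range (d+1),
            pvToFun (a.getD i []) p * pvToFun (b.getD (s-i) []) (d-p))).sum := by
  simp only [pvCoeff]
  rw [pyRange_window a.length b.length s, List.foldl_map]
  have hbody : ∀ (tot : Int), ∀ i ∈ (List.range a.length).filter
      (fun i => decide (i ≤ s ∧ s - i < b.length)),
      (PySem.List.pyRange (max 0 ((d:Int) - ((pvGetRow b ((s:Int) - (i:Int))).length:Int) + 1))
          (min ((pvGetRow a (i:Int)).length:Int) ((d:Int) + 1)) 1).foldl
        (fun tot p => tot + pvGetZ (pvGetRow a (i:Int)) (((pvGetRow a (i:Int)).length:Int) - 1 - p)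
          * pvGetZ (pvGetRow b ((s:Int) - (i:Int))) (((pvGetRow b ((s:Int) - (i:Int))).length:Int) - 1 - ((d:Int) - p))) tot
      = tot + ∑ p ∈ Finset.range (d+1),
          pvToFun (a.getD i []) p * pvToFun (b.getD (s-i) []) (d-p) := by
    intro tot i hi
    have hpi : i ≤ s ∧ s - i < b.length := by
      have := List.of_mem_filter hi
      simpa using this
    have hsi : (s:Int) - (i:Int) = (((s - i : Nat)):Int) := by
      push_cast; omega
    rw [hsi, pvGetRow_natCast a i, pvGetRow_natCast b (s-i)]
    rw [pyRange_window (a.getD i []).length (b.getD (s-i) []).length d, List.foldl_map]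
    have hinner : ∀ (acc : Int), ∀ p ∈ (List.range (a.getD i []).length).filter
        (fun p => decide (p ≤ d ∧ d - p < (b.getD (s-i) []).length)),
        acc + pvGetZ (a.getD i []) (((a.getD i []).length:Int) - 1 - ((p:Nat):Int))
          * pvGetZ (b.getD (s-i) []) (((b.getD (s-i) []).length:Int) - 1 - ((d:Int) - ((p:Nat):Int)))
        = acc + pvToFun (a.getD i []) p * pvToFun (b.getD (s-i) []) (d-p) := by
      intro acc p hp
      have hpd : p ≤ d ∧ d - p < (b.getD (s-i) []).length := by
        have := List.of_mem_filter hp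
        simpa using this
      have hpla : p < (a.getD i []).length := List.mem_range.mp (List.mem_of_mem_filter hp)
      have h1 : ((a.getD i []).length:Int) - 1 - ((p:Nat):Int)
          = ((a.getD i []).length:Int) - ((p:Nat):Int) - 1 := by ring
      have h2 : ((b.getD (s-i) []).length:Int) - 1 - ((d:Int) - ((p:Nat):Int))
          = ((b.getD (s-i) []).length:Int) - (((d - p : Nat)):Int) - 1 := by push_cast; omega
      rw [h1, h2, pvGetZ_toFun _ p hpla, pvGetZ_toFun _ (d-p) hpd.2]
    rw [PySem.List.foldl_congr_mem _ _ _ _ hinner, PySem.List.foldl_add]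
    congr 1
    rw [conv_filter_sum]
  rw [PySem.List.foldl_congr_mem _ _ _ _ hbody, PySem.List.foldl_add, zero_add]

lemma deg_fold_eq (c : Nat → Int) :
    ∀ (M : Nat), (List.range M).foldl
        (fun (deg : Int) (k : Nat) => if c k ≠ 0 then (k:Int) else deg) (-1)
      = (match pvDegB c M with | none => (-1 : Int) | some D => (D:Int)) := by
  intro M
  induction M with
  | zero => rfl
  | succ M ih =>
    rw [List.range_succ, List.foldl_append, List.foldl_cons, List.foldl_nil, pvDegB_succ]
    by_cases hc : c M ≠ 0
    · rw [if_pos hc, if_pos hc]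
    · rw [if_neg hc, if_neg hc, ih]

lemma map_range_rev (g : Nat → Int) (n : Nat) :
    (List.range (n+1)).map (fun k => g (n - k)) = ((List.range (n+1)).map g).reverse := by
  apply List.ext_getElem
  · simp
  · intro i h1 h2
    simp only [List.length_map, List.length_range] at h1 h2
    simp only [List.getElem_map, List.getElem_range, List.getElem_reverse,
      List.length_map, List.length_range]
    congr 1

lemma build_row_eq (cI cI' : Int → Int) (M : Nat)
    (hc : ∀ x : Int, 0 ≤ x → x < (M:Int) → cI' x = cI x) :
    (if (0:Int) ≤ (List.range M).foldl
        (fun (deg : Int) (k : Nat) => if cI' ((k:Nat):Int) ≠ 0 then (k:Int) else deg) (-1)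
      then (PySem.List.pyRange ((List.range M).foldl
          (fun (deg : Int) (k : Nat) => if cI' ((k:Nat):Int) ≠ 0 then (k:Int) else deg) (-1)) (-1) (-1)).map cI'
      else [0])
    = pvNormF (fun k => cI ((k:Nat):Int)) M := by
  have hfold : (List.range M).foldl
      (fun (deg : Int) (k : Nat) => if cI' ((k:Nat):Int) ≠ 0 then (k:Int) else deg) (-1)
      = (List.range M).foldl
      (fun (deg : Int) (k : Nat) => if cI ((k:Nat):Int) ≠ 0 then (k:Int) else deg) (-1) := by
    apply PySem.List.foldl_congr_mem
    intro acc k hk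
    simp only [List.mem_range] at hk
    rw [hc ((k:Nat):Int) (by positivity) (by exact_mod_cast hk)]
  rw [hfold, deg_fold_eq (fun k => cI ((k:Nat):Int)) M]
  cases hD : pvDegB (fun k => cI ((k:Nat):Int)) M with
  | none =>
    rw [pvNormF_eq_none _ _ hD]
    norm_num
  | some D =>
    obtain ⟨h1, _, _⟩ := pvDegB_eq_some _ _ _ hD
    rw [pvNormF_eq_some _ _ _ hD]
    rw [if_pos (by positivity)]
    rw [PySem.List.pyRange_neg_one]
    have hcst : ((D:Int) - (-1)).toNat = D + 1 := by omega
    rw [hcst, List.map_map]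
    rw [← map_range_rev]
    apply List.map_congr_left
    intro k hk
    simp only [List.mem_range] at hk
    simp only [Function.comp_apply]
    rw [hc ((D:Int) - (k:Int)) (by omega) (by omega)]
    congr 1
    push_cast
    omega

-- ---- final assembly: strip the leading [0] rows and take the x-window ----

lemma pvLeadRows_le (ys : List (List Int)) : pvLeadRows ys ≤ ys.length := by
  induction ys with
  | nil => simp [pvLeadRows]
  | cons r rs ih =>
    show (if r = [0] then pvLeadRows rs + 1 else 0) ≤ rs.length + 1
    split_ifs <;> omega

lemma pvLeadRows_replicate (n : Nat) : pvLeadRows (List.replicate n ([0] : List Int)) = n := by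
  induction n with
  | zero => rfl
  | succ n ih =>
    show (if ([0] : List Int) = [0] then pvLeadRows (List.replicate n [0]) + 1 else 0) = n + 1
    rw [if_pos rfl, ih]

lemma pvLeadRows_append_replicate (c : Nat) (ys : List (List Int)) :
    pvLeadRows (List.replicate c ([0] : List Int) ++ ys) = c + pvLeadRows ys := by
  induction c with
  | zero => simp
  | succ c ih =>
    show (if ([0] : List Int) = [0] then pvLeadRows (List.replicate c [0] ++ ys) + 1 else 0)
      = (c + 1) + pvLeadRows ys
    rw [if_pos rfl, ih]
    omega

lemma drop_append_replicate (c k : Nat) (ys : List (List Int)) :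
    (List.replicate c ([0] : List Int) ++ ys).drop (c + k) = ys.drop k := by
  have h := List.drop_length_add_append (l₁ := List.replicate c ([0] : List Int)) (l₂ := ys) k
  simpa using h

set_option maxHeartbeats 1000000 in
lemma int_toNat_cast (x : Int) : ((x.toNat : Nat) : Int) = max x 0 := by omega

lemma final_assembly (R : Nat → List Int) (NI x_size : Int) :
    (if pvLeadRows ((List.range NI.toNat).map
          (fun (s : Nat) => if NI - x_size ≤ (s:Int) then R s else [0]))
        = ((List.range NI.toNat).map
          (fun (s : Nat) => if NI - x_size ≤ (s:Int) then R s else [0])).length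
      then [[0]]
      else PySem.List.slice (((List.range NI.toNat).map
          (fun (s : Nat) => if NI - x_size ≤ (s:Int) then R s else [0])).drop
            (pvLeadRows ((List.range NI.toNat).map
              (fun (s : Nat) => if NI - x_size ≤ (s:Int) then R s else [0]))))
          (some (-x_size)) none)
    = (if pvLeadRows ((List.range ((NI - max (NI - x_size) 0).toNat)).map
          (fun k => R ((max (NI - x_size) 0).toNat + k)))
        < ((List.range ((NI - max (NI - x_size) 0).toNat)).map
          (fun k => R ((max (NI - x_size) 0).toNat + k))).length
      then ((List.range ((NI - max (NI - x_size) 0).toNat)).map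
          (fun k => R ((max (NI - x_size) 0).toNat + k))).drop
            (pvLeadRows ((List.range ((NI - max (NI - x_size) 0).toNat)).map
              (fun k => R ((max (NI - x_size) 0).toNat + k))))
      else [[0]]) := by
  set N := NI.toNat with hN
  set lo := (max (NI - x_size) 0).toNat with hlo
  set K := (NI - max (NI - x_size) 0).toNat with hK
  set rows := (List.range K).map (fun k => R (lo + k)) with hrows
  have hlenrows : rows.length = K := by rw [hrows]; simp
  have hN2 : ((N : Nat) : Int) = max NI 0 := by rw [hN, int_toNat_cast]
  have hlo2 : ((lo : Nat) : Int) = max (NI - x_size) 0 := by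
    rw [hlo, int_toNat_cast]
    exact max_eq_left (le_max_right _ _)
  have hK2 : ((K : Nat) : Int) = max (NI - max (NI - x_size) 0) 0 := by rw [hK, int_toNat_cast]
  by_cases hKz : K = 0
  · -- window empty: everything is [0] on both sides
    have hNlo : N ≤ lo := by omega
    have hA : (List.range N).map (fun (s : Nat) => if NI - x_size ≤ (s:Int) then R s else [0])
        = List.replicate N ([0] : List Int) := by
      apply List.ext_getElem
      · simp
      · intro i h1 h2
        simp only [List.length_map, List.length_range] at h1
        simp only [List.getElem_map, List.getElem_range, List.getElem_replicate]
        rw [if_neg (by omega)]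
    rw [hA, pvLeadRows_replicate]
    rw [if_pos (by simp)]
    have hrows0 : rows = [] := by rw [hrows, hKz]; simp
    rw [hrows0]
    simp [pvLeadRows]
  · have hloK : lo + K = N := by omega
    have hA : (List.range N).map (fun (s : Nat) => if NI - x_size ≤ (s:Int) then R s else [0])
        = List.replicate lo ([0] : List Int) ++ rows := by
      apply List.ext_getElem
      · simp [hlenrows]; omega
      · intro i h1 h2
        simp only [List.length_map, List.length_range] at h1
        by_cases hi : i < lo
        · rw [List.getElem_append_left (by simp; omega)]
          simp only [List.getElem_map, List.getElem_range, List.getElem_replicate]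
          rw [if_neg (by omega)]
        · rw [List.getElem_append_right (by simp; omega)]
          simp only [hrows, List.getElem_map, List.getElem_range, List.length_replicate]
          rw [if_pos (by omega)]
          congr 1
          omega
    rw [hA, pvLeadRows_append_replicate]
    have hk_le : pvLeadRows rows ≤ K := by
      have := pvLeadRows_le rows
      omega
    by_cases hk : pvLeadRows rows = K
    · have h1 : lo + pvLeadRows rows = (List.replicate lo ([0]:List Int) ++ rows).length := by
        simp only [List.length_append, List.length_replicate, hlenrows, hk]
      rw [if_pos h1, if_neg (show ¬ pvLeadRows rows < rows.length by omega)]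
    · have h1 : ¬ (lo + pvLeadRows rows = (List.replicate lo ([0]:List Int) ++ rows).length) := by
        simp only [List.length_append, List.length_replicate, hlenrows]
        omega
      rw [if_neg h1, if_pos (show pvLeadRows rows < rows.length by omega)]
      rw [drop_append_replicate]
      -- the slice keeps everything: the remaining list is shorter than x_size
      have hxpos : 0 < x_size := by omega
      have hlen2 : (rows.drop (pvLeadRows rows)).length ≤ x_size.toNat := by
        simp only [List.length_drop, hlenrows]
        omega
      have hx : -x_size = -((x_size.toNat : Nat) : Int) := by omega
      rw [hx, PySem.List.slice_from_neg_natCast _ _ (by omega)]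
      rw [Nat.sub_eq_zero_of_le hlen2, List.drop_zero]

lemma mg_rows_eq (a b : List (List Int)) (x_size y : Int) :
    ((List.range a.length).foldl (fun (ans : List (List Int)) (t : Nat) =>
        (List.range b.length).foldl (fun (ans : List (List Int)) (j : Nat) =>
          if (a.length:Int) + (b.length:Int) - 1 - x_size ≤ (t:Int) + (j:Int) then
            ans.set ((t:Int) + (j:Int)).toNat
              (add_local (pvGetRow ans ((t:Int) + (j:Int)))
                (mult_local (pvGetRow a (t:Int)) (pvGetRow b (j:Int)) y))
          else ans) ans)
        (List.replicate (((a.length:Int) + (b.length:Int) - 1).toNat) [0]))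
      = (List.range (((a.length:Int) + (b.length:Int) - 1).toNat)).map
          (fun (s : Nat) => if (a.length:Int) + (b.length:Int) - 1 - x_size ≤ (s:Int)
            then pvRowUpTo a b y s a.length else [0]) := by
  obtain ⟨hlen, hget⟩ := mg_outer a b x_size y a.length (le_refl _)
  apply List.ext_getElem
  · rw [hlen]; simp
  · intro i h1 h2
    have hN : i < ((a.length:Int) + (b.length:Int) - 1).toNat := by
      rw [hlen] at h1; exact h1
    have hg := hget i hN
    rw [List.getD_eq_getElem _ _ (by simpa using h1)] at hg
    rw [hg]
    simp only [List.getElem_map, List.getElem_range]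

lemma row_bridge (a b : List (List Int)) (y : Int) (s : Nat) :
    pvNormF (fun d => pvCoeff a b (s:Int) (d:Int)) ((pvBoundI a b y).toNat)
      = pvRowUpTo a b y s a.length := by
  rw [rowA_norm]
  apply pvNormF_congr
  intro d hd
  have hdy : (d:Int) ≤ y := by
    have h2 : ((pvBoundI a b y).toNat : Int) = pvBoundI a b y :=
      Int.toNat_of_nonneg (le_max_left _ _)
    have h1 : (d:Int) < pvBoundI a b y := by
      rw [← h2]
      exact_mod_cast hd
    unfold pvBoundI at h1
    rcases lt_max_iff.mp h1 with h | h
    · omega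
    · have := (lt_min_iff.mp h).1
      omega
  rw [pvCoeff_eq]
  congr 1
  apply List.map_congr_left
  intro i _
  unfold pvCapConv
  rw [if_pos hdy]

-- ===== VERDICT helper: the two ports compute the same rows =====
set_option maxHeartbeats 1000000 in
theorem mult_global_spec : Claim_equal_mult_global := by
  unfold Claim_equal_mult_global
  intro a b x_size y_pow _
  unfold Spec_mult_global
  simp only [mult_global, mult_global_alt]
  simp only [foldl_pyRange_zero_toNat, Int.toNat_natCast]
  rw [mg_rows_eq a b x_size y_pow]
  rw [PySem.List.foldl_append_singleton_eq_map, List.nil_append]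
  rw [PySem.List.pyRange_one (max ((a.length:Int) + (b.length:Int) - 1 - x_size) 0)
    ((a.length:Int) + (b.length:Int) - 1), List.map_map]
  set BND := max 0 (min (y_pow + 1)
      (a.foldl (fun m r => max m (r.length:Int)) 0
        + b.foldl (fun m r => max m (r.length:Int)) 0 - 1)) with hBND
  set LOI := max ((a.length:Int) + (b.length:Int) - 1 - x_size) 0 with hLOI
  have hBND0 : ((BND.toNat : Nat) : Int) = BND := by
    rw [hBND]; exact Int.toNat_of_nonneg (le_max_left _ _)
  have hLOI0 : ((LOI.toNat : Nat) : Int) = LOI := by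
    rw [hLOI]; exact Int.toNat_of_nonneg (le_max_right _ _)
  have hBmap : ∀ (k : Nat), k ∈ List.range (((a.length:Int) + (b.length:Int) - 1 - LOI).toNat) →
      ((fun (s : Int) =>
        if (0:Int) ≤ (List.range (BND.toNat)).foldl
            (fun (acc : Int) (k' : Nat) =>
              if PySem.List.pyGetD ((PySem.List.pyRange 0 BND 1).map (pvCoeff a b s)) ((k':Nat):Int) 0 ≠ 0
              then (k':Int) else acc) (-1)
        then (PySem.List.pyRange ((List.range (BND.toNat)).foldl
            (fun (acc : Int) (k' : Nat) =>
              if PySem.List.pyGetD ((PySem.List.pyRange 0 BND 1).map (pvCoeff a b s)) ((k':Nat):Int) 0 ≠ 0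
              then (k':Int) else acc) (-1)) (-1) (-1)).map
            (fun d => PySem.List.pyGetD ((PySem.List.pyRange 0 BND 1).map (pvCoeff a b s)) d 0)
        else [0]) ∘ (fun (k : Nat) => LOI + (k:Int))) k
      = pvRowUpTo a b y_pow (LOI.toNat + k) a.length := by
    intro k _
    simp only [Function.comp_apply]
    have hsI : LOI + (k:Int) = (((LOI.toNat + k : Nat)) : Int) := by
      push_cast
      omega
    rw [hsI]
    rw [build_row_eq (pvCoeff a b (((LOI.toNat + k : Nat)) : Int))
      (fun d => PySem.List.pyGetD
        ((PySem.List.pyRange 0 BND 1).map (pvCoeff a b (((LOI.toNat + k : Nat)) : Int))) d 0)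
      (BND.toNat)
      (fun x hx0 hxM => PySem.List.pyGetD_map_pyRange_of_nonneg _ BND x 0 hx0 (by omega))]
    exact row_bridge a b y_pow _
  rw [List.map_congr_left hBmap]
  exact final_assembly (fun s => pvRowUpTo a b y_pow s a.length)
    ((a.length:Int) + (b.length:Int) - 1) x_size
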